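-- pv_equiv track=rewrite | github.com/wazuh/wazuh | framework/wazuh/wdb.py | __query_lower
-- ===== SOURCE A (Python) =====
-- def __query_lower(query):
--     """
--     Convert a query to lower except the words between ""
--     """
--
--     to_lower = True
--     new_query = ""
--
--     for i in query:
--         if to_lower and i != "'":
--             new_query += i.lower()
--         elif to_lower and i == "'":
--             new_query += i
--             to_lower = False
--         elif not to_lower and i != "'":
--             new_query += i
--         elif not to_lower and i == "'":
--             new_query += i
--             to_lower = True
--
--     return new_query
-- ===== SOURCE B (Python) =====
-- def __query_lower(query):
--     """
--     Convert a query to lower except the words between ""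
--     """
--     return "'".join(p.lower() if i % 2 == 0 else p
--                     for i, p in enumerate(query.split("'")))
-- ===== Notes on version B (the rewrite author's own statement) =====
-- stated objective: simpler
-- what changed: Replaces the per-character boolean-toggle loop (with quadratic string += accumulation) with a split-on-quote / lowercase-even-indexed-segments / rejoin one-liner over whole segments.
import Mathlib
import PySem

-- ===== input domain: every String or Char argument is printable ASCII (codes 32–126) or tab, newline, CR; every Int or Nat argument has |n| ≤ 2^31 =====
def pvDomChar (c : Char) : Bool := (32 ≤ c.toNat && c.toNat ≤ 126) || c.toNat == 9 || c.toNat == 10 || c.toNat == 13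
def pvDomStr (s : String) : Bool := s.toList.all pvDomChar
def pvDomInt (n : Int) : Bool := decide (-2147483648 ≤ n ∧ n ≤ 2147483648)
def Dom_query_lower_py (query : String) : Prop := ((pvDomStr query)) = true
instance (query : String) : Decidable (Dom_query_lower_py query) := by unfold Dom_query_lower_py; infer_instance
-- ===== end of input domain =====

-- B replaces A's per-character boolean-toggle loop with split-on-quote / lowercase even segments / rejoin (objective: simpler).

-- ===== PORT A =====
-- A's loop body: state = (to_lower, new_query); += ported as list append on code points.
def pvStepA (st : Bool × List Char) (i : Char) : Bool × List Char :=
  if st.1 && i != '\'' then (st.1, st.2 ++ [PySem.Chars.lowerChar i])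
  else if st.1 && i == '\'' then (false, st.2 ++ [i])
  else if !st.1 && i != '\'' then (st.1, st.2 ++ [i])
  else (true, st.2 ++ [i])

def query_lower_py (query : String) : String :=
  let r := query.toList.foldl pvStepA (true, [])
  String.mk r.2

-- ===== PORT B =====
-- B: split on the quote, lowercase the even-indexed (outside-quote) segments, rejoin.
def query_lower_py_alt (query : String) : String :=
  let parts := PySem.Chars.splitOn query.toList ['\'']
  String.mk (PySem.Chars.join ['\'']
    ((PySem.List.enumerate parts).map
      (fun p => if p.1 % 2 == 0 then PySem.Chars.lower p.2 else p.2)))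

-- ===== PRECONDITION & SPEC =====
def Spec_query_lower_py (query : String) (out : String) : Prop := out = query_lower_py_alt query
instance (query : String) (out : String) : Decidable (Spec_query_lower_py query out) := by unfold Spec_query_lower_py; infer_instance

-- ===== CLAIM (what is proved, stated in full; the proofs are below) =====
def Claim_equal_query_lower_py : Prop := ∀ (query : String), Dom_query_lower_py query → Spec_query_lower_py query (query_lower_py query)

-- ===== LEMMAS AND PROOFS =====

-- the common recursive characterization: lowercase while the toggle is on
def pvTog (b : Bool) : List Char → List Char
  | [] => []
  | c :: cs =>
    if c = '\'' then c :: pvTog (!b) cs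
    else if b then PySem.Chars.lowerChar c :: pvTog b cs
    else c :: pvTog b cs

-- simple structural split on a single character
def pvSp (q : Char) : List Char → List (List Char)
  | [] => [[]]
  | c :: cs => if c = q then [] :: pvSp q cs else (pvSp q cs).modifyHead (c :: ·)

theorem pvSp_ne_nil (q : Char) (l : List Char) : pvSp q l ≠ [] := by
  cases l with
  | nil => simp [pvSp]
  | cons c cs =>
    simp only [pvSp]
    split
    · simp
    · cases h : pvSp q cs with
      | nil => exact absurd h (pvSp_ne_nil q cs)
      | cons p ps => simp

theorem pvModifyHead_id {α : Type} (xs : List α) : xs.modifyHead (fun x => x) = xs := by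
  cases xs <;> simp

theorem pvGo_eq (q : Char) (fuel : Nat) (l cur : List Char) (acc : List (List Char))
    (h : l.length ≤ fuel) :
    PySem.Chars.splitOn.go [q] fuel l cur acc
      = acc.reverse ++ (pvSp q l).modifyHead (cur.reverse ++ ·) := by
  induction l generalizing fuel cur acc with
  | nil =>
    cases fuel with
    | zero => simp [PySem.Chars.splitOn.go, pvSp]
    | succ f => simp [PySem.Chars.splitOn.go, pvSp]
  | cons c cs ih =>
    cases fuel with
    | zero => simp at h
    | succ f =>
      have hf : cs.length ≤ f := by simpa using h
      by_cases hc : c = q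
      · subst hc
        have hpre : ([c].isPrefixOf (c :: cs)) = true := by simp [List.isPrefixOf]
        simp only [PySem.Chars.splitOn.go, hpre, if_pos]
        rw [show List.drop [c].length (c :: cs) = cs from rfl, ih f [] (cur.reverse :: acc) hf]
        simp [pvSp, pvModifyHead_id]
      · have hpre : ([q].isPrefixOf (c :: cs)) = false := by
          simp [List.isPrefixOf]
          exact fun hq => absurd hq.symm hc
        simp only [PySem.Chars.splitOn.go, hpre]
        rw [if_neg (by simp), ih f (c :: cur) acc hf]
        simp only [pvSp, if_neg hc]
        cases hsp : pvSp q cs with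
        | nil => exact absurd hsp (pvSp_ne_nil q cs)
        | cons p ps => simp

theorem pvSplitOn_eq (q : Char) (l : List Char) :
    PySem.Chars.splitOn l [q] = pvSp q l := by
  show PySem.Chars.splitOn.go [q] (l.length + 1) l [] [] = pvSp q l
  rw [pvGo_eq q (l.length + 1) l [] [] (by omega)]
  simp [pvModifyHead_id]

-- alternating transforms of the parts list
mutual
def pvAltE : List (List Char) → List (List Char)
  | [] => []
  | p :: ps => PySem.Chars.lower p :: pvAltO ps
def pvAltO : List (List Char) → List (List Char)
  | [] => []
  | p :: ps => p :: pvAltE ps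
end

theorem pvEnum_map (ps : List (List Char)) (k : Int) (hk : 0 ≤ k) :
    (PySem.List.enumerate ps k).map
        (fun p => if p.1 % 2 == 0 then PySem.Chars.lower p.2 else p.2)
      = if k % 2 = 0 then pvAltE ps else pvAltO ps := by
  induction ps generalizing k with
  | nil => simp [PySem.List.enumerate, pvAltE, pvAltO]
  | cons p ps ih =>
    rw [PySem.List.enumerate_cons, List.map_cons, ih (k + 1) (by omega)]
    by_cases h : k % 2 = 0
    · have h1 : (k + 1) % 2 ≠ 0 := by omega
      simp [h, h1, pvAltE]
    · have h1 : (k + 1) % 2 = 0 := by omega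
      simp [h, h1, pvAltO]

-- prepending a character to the first part prepends it to the join
theorem pvJoin_cons_head (sep : List Char) (a : Char) (x : List Char)
    (xs : List (List Char)) :
    PySem.Chars.join sep ((a :: x) :: xs) = a :: PySem.Chars.join sep (x :: xs) := by
  cases xs with
  | nil => simp [PySem.Chars.join_singleton]
  | cons y ys => simp [PySem.Chars.join_cons_cons]

theorem pvJoin_alt (l : List Char) :
    PySem.Chars.join ['\''] (pvAltE (pvSp '\'' l)) = pvTog true l
      ∧ PySem.Chars.join ['\''] (pvAltO (pvSp '\'' l)) = pvTog false l := by
  induction l with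
  | nil => simp [pvSp, pvAltE, pvAltO, pvTog, PySem.Chars.join_singleton, PySem.Chars.lower]
  | cons c cs ih =>
    obtain ⟨ihE, ihO⟩ := ih
    cases hsp : pvSp '\'' cs with
    | nil => exact absurd hsp (pvSp_ne_nil _ cs)
    | cons p ps =>
      rw [hsp] at ihE ihO
      by_cases hc : c = '\''
      · subst hc
        rw [show pvSp '\'' ('\'' :: cs) = [] :: p :: ps by simp [pvSp, hsp],
          show pvTog true ('\'' :: cs) = '\'' :: pvTog false cs by simp [pvTog],
          show pvTog false ('\'' :: cs) = '\'' :: pvTog true cs by simp [pvTog]]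
        constructor
        · -- pvAltE ([] :: p :: ps) = [] :: (p :: pvAltE ps) = [] :: pvAltO (p :: ps)
          rw [show pvAltE ([] :: p :: ps)
                = [] :: p :: pvAltE ps by simp [pvAltE, pvAltO, PySem.Chars.lower],
            PySem.Chars.join_cons_cons]
          simp only [pvAltO] at ihO
          simp [ihO]
        · rw [show pvAltO ([] :: p :: ps)
                = [] :: PySem.Chars.lower p :: pvAltO ps by simp [pvAltE, pvAltO],
            PySem.Chars.join_cons_cons]
          simp only [pvAltE] at ihE
          simp [ihE]
      · rw [show pvSp '\'' (c :: cs) = (c :: p) :: ps by simp [pvSp, hc, hsp],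
          show pvTog true (c :: cs) = PySem.Chars.lowerChar c :: pvTog true cs by simp [pvTog, hc],
          show pvTog false (c :: cs) = c :: pvTog false cs by simp [pvTog, hc]]
        constructor
        · rw [show pvAltE ((c :: p) :: ps)
                = (PySem.Chars.lowerChar c :: PySem.Chars.lower p) :: pvAltO ps by
              simp [pvAltE, PySem.Chars.lower],
            pvJoin_cons_head]
          simp only [pvAltE] at ihE
          simp [ihE]
        · rw [show pvAltO ((c :: p) :: ps) = (c :: p) :: pvAltE ps by simp [pvAltO],
            pvJoin_cons_head]
          simp only [pvAltO] at ihO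
          simp [ihO]

-- A's fold equals the toggle recursion
theorem pvFold_eq (l : List Char) (b : Bool) (acc : List Char) :
    (l.foldl pvStepA (b, acc)).2 = acc ++ pvTog b l := by
  induction l generalizing b acc with
  | nil => simp [pvTog]
  | cons c cs ih =>
    rw [List.foldl_cons]
    by_cases hc : c = '\''
    · subst hc
      cases b
      · rw [show pvStepA (false, acc) '\'' = (true, acc ++ ['\'']) by simp [pvStepA], ih]
        simp [pvTog]
      · rw [show pvStepA (true, acc) '\'' = (false, acc ++ ['\'']) by simp [pvStepA], ih]
        simp [pvTog]
    · cases b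
      · rw [show pvStepA (false, acc) c = (false, acc ++ [c]) by simp [pvStepA, hc], ih]
        simp [pvTog, hc]
      · rw [show pvStepA (true, acc) c
            = (true, acc ++ [PySem.Chars.lowerChar c]) by simp [pvStepA, hc], ih]
        simp [pvTog, hc]

-- ===== VERDICT (by name: the statement is the Claim_ definition above) =====
theorem query_lower_py_spec : Claim_equal_query_lower_py := by
  intro query _
  show query_lower_py query = query_lower_py_alt query
  simp only [query_lower_py, query_lower_py_alt]
  rw [pvSplitOn_eq, pvEnum_map _ 0 le_rfl, pvFold_eq]
  simp [(pvJoin_alt query.toList).1]
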